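-- pv_equiv track=rewrite | github.com/manash997/vibhakti_predictor_mt5-base | mt5_vib_predn.py | gen_sen
-- ===== SOURCE A (Python) =====
-- def gen_sen(sentence,op_tokens):
--     sent_list=sentence.strip().split()
--     count=0
--     op_tok_list=op_tokens.split()
--     for word_inx in range(len(sent_list)):
--         if sent_list[word_inx]=="[MASK]":
--             sent_list[word_inx]=op_tok_list[count]
--             count+=1
--     return " ".join(sent_list)
-- ===== SOURCE B (Python) =====
-- def _fill(segments, ops):
--     # interleave: one output token before each remaining segment
--     if not segments:
--         return []
--     return [ops[0]] + segments[0] + _fill(segments[1:], ops[1:])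
--
-- def gen_sen(sentence, op_tokens):
--     # split the sentence into the segments between "[MASK]" delimiters,
--     # then interleave the output tokens between the segments
--     done = []
--     cur = []
--     for w in sentence.strip().split():
--         if w == "[MASK]":
--             done.append(cur)
--             cur = []
--         else:
--             cur = cur + [w]
--     segs = done + [cur]
--     return " ".join(segs[0] + _fill(segs[1:], op_tokens.split()))
-- ===== Notes on version B (the rewrite author's own statement) =====
-- stated objective: alternative
-- what changed: Instead of A's single replace-in-place pass with a running counter, B treats [MASK] as a delimiter: it splits the word list into the segments between masks and then recursively interleaves the output tokens between those segments.
import Mathlib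
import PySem

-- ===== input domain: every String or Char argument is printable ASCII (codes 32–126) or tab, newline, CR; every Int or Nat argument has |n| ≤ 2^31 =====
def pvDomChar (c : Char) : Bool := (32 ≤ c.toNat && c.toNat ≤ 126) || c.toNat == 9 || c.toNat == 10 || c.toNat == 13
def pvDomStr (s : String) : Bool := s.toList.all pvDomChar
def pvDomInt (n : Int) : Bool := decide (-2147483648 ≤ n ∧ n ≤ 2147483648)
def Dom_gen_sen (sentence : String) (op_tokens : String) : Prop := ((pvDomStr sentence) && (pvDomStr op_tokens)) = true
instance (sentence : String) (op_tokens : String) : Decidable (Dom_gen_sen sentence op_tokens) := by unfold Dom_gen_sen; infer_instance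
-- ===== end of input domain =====

-- B splits the word list on "[MASK]" delimiters and interleaves the output tokens between the segments (alternative decomposition); return value only.


-- ===== PORT A =====
-- literal port of A: fold over range(len(sent_list)) mutating the list with a counter state
def gen_sen (sentence : String) (op_tokens : String) : String :=
  let sentList := PySem.Str.split₀ (PySem.Str.strip sentence)
  let opTokList := PySem.Str.split₀ op_tokens
  let st := (PySem.List.pyRange 0 (sentList.length : Int) 1).foldl
    (fun (st : List String × Int) wordInx =>
      if PySem.List.pyGetD st.1 wordInx "" == "[MASK]" then
        (PySem.List.pySetD st.1 wordInx (PySem.List.pyGetD opTokList st.2 ""), st.2 + 1)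
      else st) (sentList, 0)
  PySem.Str.join " " st.1

-- ===== PORT B =====
-- port of Source B's _fill: one output token before each remaining segment
def fillSegs : List (List String) → List String → List String
  | [], _ => []
  | s :: r, ops => PySem.List.pyGetD ops 0 "" :: (s ++ fillSegs r (ops.drop 1))

-- port of Source B's gen_sen: fold collecting (done, cur) segments, then join segs[0] ++ _fill(segs[1:], ops)
def gen_sen_alt (sentence : String) (op_tokens : String) : String :=
  let st := (PySem.Str.split₀ (PySem.Str.strip sentence)).foldl
    (fun (st : List (List String) × List String) w =>
      if w == "[MASK]" then (st.1 ++ [st.2], ([] : List String)) else (st.1, st.2 ++ [w]))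
    ([], [])
  let segs := st.1 ++ [st.2]
  PySem.Str.join " " (segs.headD [] ++ fillSegs (segs.drop 1) (PySem.Str.split₀ op_tokens))

-- ===== PRECONDITION & SPEC =====
-- Pre_ excludes exactly the inputs with more "[MASK]" words than output tokens, where A raises IndexError (and B raises too).
def Pre_gen_sen (sentence : String) (op_tokens : String) : Prop :=
  (PySem.Str.split₀ (PySem.Str.strip sentence)).count "[MASK]" ≤ (PySem.Str.split₀ op_tokens).length
instance (sentence : String) (op_tokens : String) : Decidable (Pre_gen_sen sentence op_tokens) := by
  unfold Pre_gen_sen; infer_instance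
def pvWitness_gen_sen : String × String := ("a [MASK] b", "ko")

def Spec_gen_sen (sentence : String) (op_tokens : String) (out : String) : Prop := out = gen_sen_alt sentence op_tokens
instance (sentence : String) (op_tokens : String) (out : String) : Decidable (Spec_gen_sen sentence op_tokens out) := by unfold Spec_gen_sen; infer_instance

-- ===== CLAIM (what is proved, stated in full; the proofs are below) =====
def Claim_equal_gen_sen : Prop := ∀ (sentence : String) (op_tokens : String), Dom_gen_sen sentence op_tokens → Pre_gen_sen sentence op_tokens → Spec_gen_sen sentence op_tokens (gen_sen sentence op_tokens)

-- ===== LEMMAS AND PROOFS =====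

-- proof-only intermediate form: A's replace pass, written as structural recursion
def genSenFill : List String → List String → List String
  | [], _ => []
  | w :: ws, ops =>
    if w == "[MASK]" then ops.headD "" :: genSenFill ws (ops.drop 1)
    else w :: genSenFill ws ops

-- proof-only recursive characterisation of B's segment-collecting fold: (first segment, remaining segments)
def segsR : List String → List String × List (List String)
  | [] => ([], [])
  | w :: ws =>
    if w == "[MASK]" then ([], (segsR ws).1 :: (segsR ws).2)
    else (w :: (segsR ws).1, (segsR ws).2)

-- the loop invariant for A: after processing prefix p (k masks replaced so far), the fold fills the suffix exactly as genSenFill on the remaining tokens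
lemma gen_sen_loop_inv (ops : List String) :
    ∀ (sl p : List String) (k : Nat),
    (PySem.List.pyRange (p.length : Int) ((p.length : Int) + (sl.length : Int)) 1).foldl
      (fun (st : List String × Int) wordInx =>
        if PySem.List.pyGetD st.1 wordInx "" == "[MASK]" then
          (PySem.List.pySetD st.1 wordInx (PySem.List.pyGetD ops st.2 ""), st.2 + 1)
        else st) (p ++ sl, (k : Int))
    = (p ++ genSenFill sl (ops.drop k), (k : Int) + (sl.count "[MASK]" : Int)) := by
  intro sl
  induction sl with
  | nil =>
      intro p k
      simp [PySem.List.pyRange_one_eq_nil, genSenFill]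
  | cons w ws ih =>
      intro p k
      rw [PySem.List.pyRange_one_cons (by simp)]
      simp only [List.foldl_cons]
      have hget : PySem.List.pyGetD (p ++ w :: ws) ((p.length : Int)) "" = w := by
        simp [PySem.List.pyGetD_natCast, List.getD_eq_getElem?_getD]
      by_cases hw : w = "[MASK]"
      · subst hw
        have hset : PySem.List.pySetD (p ++ "[MASK]" :: ws) ((p.length : Int))
            (PySem.List.pyGetD ops (k : Int) "") = (p ++ [(ops.drop k).headD ""]) ++ ws := by
          simp [PySem.List.pySetD_natCast, PySem.List.pyGetD_natCast,
            List.getD_eq_getElem?_getD, List.head?_drop, List.headD_eq_head?_getD]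
        rw [hget]
        simp only [beq_self_eq_true, if_true]
        rw [hset]
        rw [show ((k : Int) + 1) = (((k + 1 : Nat)) : Int) by push_cast; ring]
        rw [show ((p.length : Int) + 1) = (((p ++ [(ops.drop k).headD ""]).length : Nat) : Int) by
          simp]
        rw [show ((p.length : Int) + ((("[MASK]" :: ws).length : Nat) : Int))
            = (((p ++ [(ops.drop k).headD ""]).length : Nat) : Int) + ((ws.length : Nat) : Int) by
          simp; ring]
        rw [ih (p ++ [(ops.drop k).headD ""]) (k + 1)]
        have hdrop : ops.drop (k + 1) = (ops.drop k).drop 1 := by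
          rw [List.drop_drop]
        simp only [genSenFill, beq_self_eq_true, if_true, hdrop, List.count_cons,
          Prod.mk.injEq]
        refine ⟨by simp, by push_cast; ring⟩
      · have hwne : (w == "[MASK]") = false := by simp [hw]
        rw [hget]
        simp only [hwne, Bool.false_eq_true, if_false]
        rw [show p ++ w :: ws = (p ++ [w]) ++ ws by simp]
        rw [show ((p.length : Int) + (((w :: ws).length : Nat) : Int))
            = (((p ++ [w]).length : Nat) : Int) + ((ws.length : Nat) : Int) by
          simp; ring]
        rw [show ((p.length : Int) + 1) = (((p ++ [w]).length : Nat) : Int) by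
          simp]
        rw [ih (p ++ [w]) k]
        simp [genSenFill, hwne, hw]

-- B's segment fold, started from any (acc, cur), produces acc ++ (cur-extended first segment) :: rest
lemma segs_fold_eq (ws : List String) :
    ∀ (acc : List (List String)) (cur : List String),
    (ws.foldl
        (fun (st : List (List String) × List String) w =>
          if w == "[MASK]" then (st.1 ++ [st.2], ([] : List String)) else (st.1, st.2 ++ [w]))
        (acc, cur)).1 ++ [(ws.foldl
        (fun (st : List (List String) × List String) w =>
          if w == "[MASK]" then (st.1 ++ [st.2], ([] : List String)) else (st.1, st.2 ++ [w]))
        (acc, cur)).2]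
    = acc ++ (cur ++ (segsR ws).1) :: (segsR ws).2 := by
  induction ws with
  | nil => intro acc cur; simp [segsR]
  | cons w ws ih =>
      intro acc cur
      by_cases hw : w = "[MASK]"
      · subst hw
        simp only [List.foldl_cons, beq_self_eq_true, if_true]
        rw [ih (acc ++ [cur]) []]
        simp [segsR]
      · have hwne : (w == "[MASK]") = false := by simp [hw]
        simp only [List.foldl_cons, hwne, Bool.false_eq_true, if_false]
        rw [ih acc (cur ++ [w])]
        simp [segsR, hwne]

-- genSenFill = first segment ++ interleave of the remaining segments
lemma genSenFill_eq_segs (ws : List String) :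
    ∀ ops : List String, genSenFill ws ops = (segsR ws).1 ++ fillSegs (segsR ws).2 ops := by
  induction ws with
  | nil => intro ops; simp [genSenFill, segsR, fillSegs]
  | cons w ws ih =>
      intro ops
      by_cases hw : w = "[MASK]"
      · subst hw
        simp only [genSenFill, segsR, beq_self_eq_true, if_true, fillSegs, List.nil_append]
        rw [ih (ops.drop 1)]
        cases ops <;>
          simp [PySem.List.pyGetD, PySem.List.pyGet?, PySem.List.pyIdx?]
      · have hwne : (w == "[MASK]") = false := by simp [hw]
        simp only [genSenFill, segsR, hwne, Bool.false_eq_true, if_false]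
        rw [ih ops]
        simp

-- ===== VERDICT (by name: the statement is the Claim_ definition above) =====
theorem gen_sen_spec : Claim_equal_gen_sen := by
  intro sentence op_tokens _ _
  unfold Spec_gen_sen gen_sen gen_sen_alt
  have hA := gen_sen_loop_inv (PySem.Str.split₀ op_tokens)
      (PySem.Str.split₀ (PySem.Str.strip sentence)) [] 0
  simp only [List.length_nil, Nat.cast_zero, zero_add, List.nil_append, List.drop_zero] at hA
  have hB := segs_fold_eq (PySem.Str.split₀ (PySem.Str.strip sentence)) [] []
  simp only [List.nil_append] at hB
  simp only [hA, hB, List.headD_cons, List.drop_one, List.tail_cons]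
  rw [genSenFill_eq_segs]
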